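-- pv_equiv track=rewrite | github.com/shan2312/DSA-Python-Solutions | Arrays/min_power_team.py | get_min_power
-- ===== SOURCE A (Python) =====
-- import heapq
--
-- def get_min_power(peopleScores, k):
--     minHeap = []
--     maxHeap = []
--
--     left = right = 0
--     minPower = float('inf')
--
--     while right < len(peopleScores):
--         rightValue = peopleScores[right]
--
--         if len(minHeap) < (k - 1):
--             heapq.heappush(minHeap, (rightValue, right))
--             heapq.heappush(maxHeap, (-1 * rightValue, right))
--             right += 1
--             continue
--
--         heapq.heappush(minHeap, (rightValue, right))
--         heapq.heappush(maxHeap, (-1*rightValue, right))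
--
--         while maxHeap and maxHeap[0][1] < left:
--             heapq.heappop(maxHeap)
--
--         while minHeap and minHeap[0][1] < left:
--             heapq.heappop(minHeap)
--
--         if maxHeap and minHeap:
--             power = (-1*maxHeap[0][0] - minHeap[0][0])
--             minPower = min(minPower, power)
--
--         left += 1
--         right += 1
--
--     return minPower if minPower != float('inf') else -1
-- ===== SOURCE B (Python) =====
-- def get_min_power(peopleScores, k):
--     # Min over all contiguous windows of size k of (max - min); windows of
--     # size below 1 behave as singletons (power 0); -1 when no window fits.
--     n = len(peopleScores)
--     w = k if k > 1 else 1
--     if w > n: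
--         return -1
--     best = None
--     for i in range(n - w + 1):
--         window = peopleScores[i:i + w]
--         power = max(window) - min(window)
--         if best is None or power < best:
--             best = power
--     return best
-- ===== Notes on version B (the rewrite author's own statement) =====
-- stated objective: simpler
-- what changed: A maintains two lazy-deletion binary heaps (heapq) and slides a window over them; B directly scans every size-k window slice and takes min(max-min), a plain two-loop computation with no auxiliary structures.
import Mathlib
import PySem

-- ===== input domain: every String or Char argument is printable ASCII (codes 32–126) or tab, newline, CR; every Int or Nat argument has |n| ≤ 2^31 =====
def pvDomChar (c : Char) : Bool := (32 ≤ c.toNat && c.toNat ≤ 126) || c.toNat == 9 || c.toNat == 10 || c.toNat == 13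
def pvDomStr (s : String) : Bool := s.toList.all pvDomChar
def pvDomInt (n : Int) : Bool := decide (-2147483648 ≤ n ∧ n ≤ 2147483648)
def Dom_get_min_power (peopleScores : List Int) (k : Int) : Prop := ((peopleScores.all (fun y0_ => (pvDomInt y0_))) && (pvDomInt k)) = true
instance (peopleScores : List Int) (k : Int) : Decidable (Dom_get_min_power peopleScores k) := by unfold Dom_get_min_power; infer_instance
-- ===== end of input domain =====

-- B replaces A's two lazy-deletion heapq heaps by a plain scan of every size-k
-- window slice taking min(max-min): simpler, no auxiliary structures (not faster).


-- ===== PORT A =====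
-- Python tuple comparison '<' on the (value, index) pairs heapq compares.
def pvLt (a b : Int × Int) : Bool := a.1 < b.1 || (a.1 == b.1 && a.2 < b.2)

def pvD0 : Int × Int := (0, 0)

-- heapq._siftdown(heap, 0, pos) where item is the value Python reads from heap[pos]
-- (the loop's writes then final 'heap[pos] = item'; startpos is 0 at every call site of A).
theorem pvSiftdownDec (pos : Nat) (h : 0 < pos) : (pos - 1) / 2 < pos :=
  Nat.lt_of_le_of_lt (Nat.div_le_self _ 2) (Nat.sub_lt h Nat.one_pos)

def pvSiftdown (heap : List (Int × Int)) (pos : Nat) (item : Int × Int) : List (Int × Int) :=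
  if 0 < pos then
    let parentpos := (pos - 1) / 2
    let parent := heap.getD parentpos pvD0
    if pvLt item parent then pvSiftdown (heap.set pos parent) parentpos item
    else heap.set pos item
  else heap.set pos item
termination_by pos
decreasing_by exact pvSiftdownDec pos (by assumption)

-- heapq.heappush(heap, item): append, then _siftdown(heap, 0, len(heap)-1).
def pvHeappush (heap : List (Int × Int)) (item : Int × Int) : List (Int × Int) :=
  pvSiftdown (heap ++ [item]) heap.length item

theorem pvSiftdown_length (heap : List (Int × Int)) (pos : Nat) (item : Int × Int) :
    (pvSiftdown heap pos item).length = heap.length := by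
  fun_induction pvSiftdown <;> simp_all

theorem pvSiftupDec (heap : List (Int × Int)) (pos : Nat) (x : Int × Int) (b : Bool)
    (h : 2 * pos + 1 < heap.length) :
    (heap.set pos x).length - (if b = true then 2 * pos + 1 + 1 else 2 * pos + 1)
      < heap.length - pos := by
  simp only [List.length_set]
  have hp1 : pos < 2 * pos + 1 := Nat.lt_succ_of_le (Nat.le_mul_of_pos_left pos Nat.two_pos)
  have hple : pos < heap.length := Nat.lt_of_le_of_lt (Nat.le_of_lt hp1) h
  cases b
  · exact Nat.sub_lt_sub_left hple hp1
  · exact Nat.sub_lt_sub_left hple (Nat.lt_succ_of_lt hp1)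

-- heapq._siftup(heap, pos): bubble the hole down to a leaf taking the smaller
-- child, then _siftdown back up (item is the value Python stored at the hole).
def pvSiftup (heap : List (Int × Int)) (pos : Nat) (item : Int × Int) : List (Int × Int) :=
  let childpos := 2 * pos + 1
  if h : childpos < heap.length then
    let rightpos := childpos + 1
    let childpos2 :=
      if rightpos < heap.length && !pvLt (heap.getD childpos pvD0) (heap.getD rightpos pvD0)
      then rightpos else childpos
    pvSiftup (heap.set pos (heap.getD childpos2 pvD0)) childpos2 item
  else pvSiftdown heap pos item
termination_by heap.length - pos
decreasing_by exact pvSiftupDec heap pos _ _ h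

theorem pvSiftup_length (heap : List (Int × Int)) (pos : Nat) (item : Int × Int) :
    (pvSiftup heap pos item).length = heap.length := by
  fun_induction pvSiftup <;> simp_all [pvSiftdown_length]

-- heapq.heappop(heap): lastelt = heap.pop(); if heap: swap into root and _siftup.
-- (Python raises IndexError on an empty heap; A only pops non-empty heaps.)
def pvHeappop (heap : List (Int × Int)) : (Int × Int) × List (Int × Int) :=
  let lastelt := heap.getD (heap.length - 1) pvD0
  let rest := heap.dropLast
  match h : rest with
  | [] => (lastelt, [])
  | r0 :: _ => (r0, pvSiftup (rest.set 0 lastelt) 0 lastelt)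

theorem pvHeappop_length (heap : List (Int × Int)) (h : heap ≠ []) :
    (pvHeappop heap).2.length = heap.length - 1 := by
  have hl := heap.length_dropLast
  unfold pvHeappop
  cases hd : heap.dropLast with
  | nil => simp [hd] at hl ⊢; omega
  | cons r0 t =>
    simp [hd, pvSiftup_length] at hl ⊢
    have := congrArg List.length hd
    simp at this
    omega

theorem pvPruneDec (heap : List (Int × Int)) (h0 : Int × Int) (tl : List (Int × Int))
    (hne : heap = h0 :: tl) : (pvHeappop heap).2.length < (h0 :: tl).length := by
  rw [pvHeappop_length heap (by rw [hne]; exact List.cons_ne_nil _ _), hne]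
  exact Nat.sub_lt (Nat.succ_pos _) Nat.one_pos

-- 'while heap and heap[0][1] < left: heappop(heap)'
def pvPrune (heap : List (Int × Int)) (left : Int) : List (Int × Int) :=
  match hne : heap with
  | [] => heap
  | h0 :: tl => if h0.2 < left then pvPrune (pvHeappop heap).2 left else heap
termination_by heap.length
decreasing_by exact pvPruneDec heap h0 tl hne

theorem pvLoopADec (xs : List Int) (right : Int) (h : right < (xs.length : Int)) :
    ((xs.length : Int) - (right + 1)).toNat < ((xs.length : Int) - right).toNat :=
  (Int.toNat_lt_toNat (Int.sub_pos.mpr h)).mpr (sub_lt_sub_left (lt_add_one right) _)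

-- the main 'while right < len(peopleScores)' loop of A
def pvLoopA (xs : List Int) (k : Int) (minHeap maxHeap : List (Int × Int))
    (left right : Int) (minPower : Option Int) : Option Int :=
  if h : right < (xs.length : Int) then
    let rightValue := PySem.List.pyGetD xs right 0
    if (minHeap.length : Int) < k - 1 then
      pvLoopA xs k (pvHeappush minHeap (rightValue, right))
        (pvHeappush maxHeap (-1 * rightValue, right)) left (right + 1) minPower
    else
      let minHeap1 := pvHeappush minHeap (rightValue, right)
      let maxHeap1 := pvHeappush maxHeap (-1 * rightValue, right)
      let maxHeap2 := pvPrune maxHeap1 left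
      let minHeap2 := pvPrune minHeap1 left
      let minPower1 :=
        if maxHeap2 ≠ [] ∧ minHeap2 ≠ [] then
          let power := -1 * (maxHeap2.getD 0 pvD0).1 - (minHeap2.getD 0 pvD0).1
          -- min(minPower, power), where minPower may still be float('inf') (none)
          some (match minPower with | none => power | some m => min m power)
        else minPower
      pvLoopA xs k minHeap2 maxHeap2 (left + 1) (right + 1) minPower1
  else minPower
termination_by ((xs.length : Int) - right).toNat
decreasing_by all_goals exact pvLoopADec xs right h

def get_min_power (peopleScores : List Int) (k : Int) : Int :=
  match pvLoopA peopleScores k [] [] 0 0 none with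
  | some m => m
  | none => -1   -- 'return minPower if minPower != float('inf') else -1'

-- ===== PORT B =====
def get_min_power_alt (peopleScores : List Int) (k : Int) : Int :=
  let n : Int := peopleScores.length
  let w : Int := if k > 1 then k else 1
  if w > n then -1
  else
    let best :=
      (PySem.List.pyRange 0 (n - w + 1) 1).foldl
        (fun best i =>
          let window := PySem.List.slice peopleScores (some i) (some (i + w))
          -- max(window) / min(window): the window is non-empty (i + w ≤ n, 1 ≤ w),
          -- so the .getD 0 defaults are never used
          let power := (PySem.List.max? window (fun x => x)).getD 0
                       - (PySem.List.min? window (fun x => x)).getD 0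
          match best with
          | none => some power
          | some b => if power < b then some power else some b)
        (none : Option Int)
    match best with
    | none => -1   -- unreachable: w ≤ n gives a non-empty range
    | some b => b

-- ===== PRECONDITION & SPEC =====
def Spec_get_min_power (peopleScores : List Int) (k : Int) (out : Int) : Prop := out = get_min_power_alt peopleScores k
instance (peopleScores : List Int) (k : Int) (out : Int) : Decidable (Spec_get_min_power peopleScores k out) := by unfold Spec_get_min_power; infer_instance

-- ===== CLAIM (what is proved, stated in full; the proofs are below) =====
def Claim_equal_get_min_power : Prop := ∀ (peopleScores : List Int) (k : Int), Dom_get_min_power peopleScores k → Spec_get_min_power peopleScores k (get_min_power peopleScores k)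

-- ===== LEMMAS AND PROOFS =====

-- ---- the strict order heapq compares with, and its complement ----
def pvLe (a b : Int × Int) : Prop := pvLt b a = false

theorem pvLt_iff (a b : Int × Int) : pvLt a b = true ↔ (a.1 < b.1 ∨ (a.1 = b.1 ∧ a.2 < b.2)) := by
  simp [pvLt]

theorem pvLe_iff (a b : Int × Int) : pvLe a b ↔ (a.1 < b.1 ∨ (a.1 = b.1 ∧ a.2 ≤ b.2)) := by
  unfold pvLe
  rw [← Bool.not_eq_true, pvLt_iff]
  constructor <;> intro h <;> omega

theorem pvLe_refl (a : Int × Int) : pvLe a a := by rw [pvLe_iff]; omega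

theorem pvLe_trans {a b c : Int × Int} (h1 : pvLe a b) (h2 : pvLe b c) : pvLe a c := by
  rw [pvLe_iff] at *; omega

theorem pvLe_of_lt {a b : Int × Int} (h : pvLt a b = true) : pvLe a b := by
  rw [pvLt_iff] at h; rw [pvLe_iff]; omega

theorem pvLe_of_not_lt {a b : Int × Int} (h : pvLt a b = false) : pvLe b a := h

theorem pvLe_fst {a b : Int × Int} (h : pvLe a b) : a.1 ≤ b.1 := by
  rw [pvLe_iff] at h; omega

-- ---- getD / set / membership helpers ----
theorem pv_getD_set_self (l : List (Int × Int)) (n : Nat) (hn : n < l.length) (a d : Int × Int) :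
    (l.set n a).getD n d = a := by
  rw [List.getD_eq_getElem?_getD, List.getElem?_set_self (by simpa using hn)]
  simp

theorem pv_getD_set_ne (l : List (Int × Int)) (n : Nat) (a d : Int × Int) (i : Nat) (h : i ≠ n) :
    (l.set n a).getD i d = l.getD i d := by
  rw [List.getD_eq_getElem?_getD, List.getElem?_set_ne (by omega), ← List.getD_eq_getElem?_getD]

theorem pv_mem_iff_getD (l : List (Int × Int)) (y : Int × Int) :
    y ∈ l ↔ ∃ i, i < l.length ∧ l.getD i pvD0 = y := by
  rw [List.mem_iff_getElem]
  constructor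
  · rintro ⟨i, hi, rfl⟩; exact ⟨i, hi, by rw [List.getD_eq_getElem _ _ hi]⟩
  · rintro ⟨i, hi, rfl⟩; exact ⟨i, hi, by rw [List.getD_eq_getElem _ _ hi]⟩

theorem pv_getD_mem (l : List (Int × Int)) (n : Nat) (hn : n < l.length) :
    l.getD n pvD0 ∈ l := (pv_mem_iff_getD l _).2 ⟨n, hn, rfl⟩

theorem pv_getD_append_left (l t : List (Int × Int)) (i : Nat) (h : i < l.length) (d : Int × Int) :
    (l ++ t).getD i d = l.getD i d := by
  rw [List.getD_eq_getElem _ _ (by simp; omega), List.getD_eq_getElem _ _ h,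
    List.getElem_append_left h]

theorem pv_getD_dropLast (l : List (Int × Int)) (i : Nat) (h : i < l.length - 1) (d : Int × Int) :
    l.dropLast.getD i d = l.getD i d := by
  rw [List.getD_eq_getElem _ _ (by simp; omega), List.getD_eq_getElem _ _ (by omega),
    List.getElem_dropLast]

theorem pv_mem_set_iff (l : List (Int × Int)) (pos : Nat) (hpos : pos < l.length)
    (a y : Int × Int) :
    y ∈ l.set pos a ↔ y = a ∨ ∃ i, i < l.length ∧ i ≠ pos ∧ l.getD i pvD0 = y := by
  rw [pv_mem_iff_getD]
  constructor
  · rintro ⟨i, hi, rfl⟩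
    rw [List.length_set] at hi
    by_cases hip : i = pos
    · subst hip; left; rw [pv_getD_set_self _ _ hi]
    · right; exact ⟨i, hi, hip, by rw [pv_getD_set_ne _ _ _ _ _ hip]⟩
  · rintro (rfl | ⟨i, hi, hip, rfl⟩)
    · exact ⟨pos, by simpa using hpos, pv_getD_set_self _ _ hpos _ _⟩
    · exact ⟨i, by simpa using hi, pv_getD_set_ne _ _ _ _ _ hip⟩

-- ---- the binary-heap shape invariant ----
def pvHeapAt (h : List (Int × Int)) : Prop :=
  ∀ j : Nat, j < h.length → 0 < j → pvLe (h.getD ((j - 1) / 2) pvD0) (h.getD j pvD0)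

theorem pvHeapAt_root_le (h : List (Int × Int)) (hh : pvHeapAt h) :
    ∀ j, j < h.length → pvLe (h.getD 0 pvD0) (h.getD j pvD0) := by
  intro j
  induction j using Nat.strong_induction_on with
  | _ j ih =>
    intro hj
    rcases Nat.eq_zero_or_pos j with rfl | hj0
    · exact pvLe_refl _
    · exact pvLe_trans (ih ((j - 1) / 2) (by omega) (by omega)) (hh j hj hj0)

theorem pvHeapAt_root_min (h : List (Int × Int)) (hh : pvHeapAt h) :
    ∀ y ∈ h, pvLe (h.getD 0 pvD0) y := by
  intro y hy
  obtain ⟨i, hi, rfl⟩ := (pv_mem_iff_getD h y).1 hy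
  exact pvHeapAt_root_le h hh i hi


-- ---- correctness of the ported heapq sift operations ----
theorem pvSiftdown_spec (pos : Nat) : ∀ (h : List (Int × Int)) (item : Int × Int),
    pos < h.length →
    (∀ j, j < h.length → 0 < j → j ≠ pos →
      pvLe (h.getD ((j - 1) / 2) pvD0) (h.getD j pvD0)) →
    (∀ j, j < h.length → 0 < j → (j - 1) / 2 = pos → pvLe item (h.getD j pvD0)) →
    (0 < pos → ∀ j, j < h.length → 0 < j → (j - 1) / 2 = pos →
      pvLe (h.getD ((pos - 1) / 2) pvD0) (h.getD j pvD0)) →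
    pvHeapAt (pvSiftdown h pos item) ∧
    (∀ y, y ∈ pvSiftdown h pos item ↔
      y = item ∨ ∃ i, i < h.length ∧ i ≠ pos ∧ h.getD i pvD0 = y) := by
  induction pos using Nat.strong_induction_on with
  | _ pos ih =>
    intro h item hpos hA hB hC
    rw [pvSiftdown]
    by_cases h0 : 0 < pos
    · simp only [if_pos h0]
      have hppos : (pos - 1) / 2 < pos := by omega
      have hpplen : (pos - 1) / 2 < h.length := by omega
      by_cases hlt : pvLt item (h.getD ((pos - 1) / 2) pvD0)
      · rw [if_pos hlt]
        have hres := ih ((pos - 1) / 2) hppos (h.set pos (h.getD ((pos - 1) / 2) pvD0)) item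
          (by simp; omega)
          (by -- hA'
            intro j hj hj0 hjpp
            rw [List.length_set] at hj
            by_cases hjpos : j = pos
            · rw [hjpos, pv_getD_set_self _ _ (hjpos ▸ hj), pv_getD_set_ne _ _ _ _ _ (by omega)]
              exact pvLe_refl _
            · rw [pv_getD_set_ne _ _ _ _ _ hjpos]
              by_cases hq : (j - 1) / 2 = pos
              · rw [hq, pv_getD_set_self _ _ hpos]
                exact hC h0 j hj hj0 hq
              · rw [pv_getD_set_ne _ _ _ _ _ hq]
                exact hA j hj hj0 hjpos)
          (by -- hB'
            intro j hj hj0 hjpp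
            rw [List.length_set] at hj
            by_cases hjpos : j = pos
            · rw [hjpos, pv_getD_set_self _ _ (hjpos ▸ hj)]
              exact pvLe_of_lt hlt
            · rw [pv_getD_set_ne _ _ _ _ _ hjpos]
              have hAj := hA j hj hj0 hjpos
              rw [hjpp] at hAj
              exact pvLe_trans (pvLe_of_lt hlt) hAj)
          (by -- hC'
            intro hpp0 j hj hj0 hjpp
            rw [List.length_set] at hj
            rw [pv_getD_set_ne _ _ _ _ _ (show ((pos - 1) / 2 - 1) / 2 ≠ pos by omega)]
            have hApp := hA ((pos - 1) / 2) hpplen hpp0 (by omega)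
            by_cases hjpos : j = pos
            · rw [hjpos, pv_getD_set_self _ _ (hjpos ▸ hj)]
              exact hApp
            · rw [pv_getD_set_ne _ _ _ _ _ hjpos]
              have hAj := hA j hj hj0 hjpos
              rw [hjpp] at hAj
              exact pvLe_trans hApp hAj)
        refine ⟨hres.1, ?_⟩
        intro y
        rw [hres.2 y]
        constructor
        · rintro (rfl | ⟨i, hi, hipp, hieq⟩)
          · left; rfl
          · rw [List.length_set] at hi
            by_cases hipos : i = pos
            · rw [hipos, pv_getD_set_self _ _ hpos] at hieq
              exact Or.inr ⟨(pos - 1) / 2, hpplen, by omega, hieq⟩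
            · rw [pv_getD_set_ne _ _ _ _ _ hipos] at hieq
              exact Or.inr ⟨i, hi, hipos, hieq⟩
        · rintro (rfl | ⟨i, hi, hipos, hieq⟩)
          · left; rfl
          · by_cases hipp : i = (pos - 1) / 2
            · subst hipp
              refine Or.inr ⟨pos, by simp; omega, by omega, ?_⟩
              rw [pv_getD_set_self _ _ hpos, ← hieq]
            · refine Or.inr ⟨i, by simp; omega, hipp, ?_⟩
              rw [pv_getD_set_ne _ _ _ _ _ hipos, hieq]
      · rw [if_neg hlt]
        constructor
        · intro j hj hj0
          rw [List.length_set] at hj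
          by_cases hjpos : j = pos
          · rw [hjpos, pv_getD_set_self _ _ (hjpos ▸ hj), pv_getD_set_ne _ _ _ _ _ (by omega)]
            exact pvLe_of_not_lt (by simpa using hlt)
          · rw [pv_getD_set_ne _ _ _ _ _ hjpos]
            by_cases hq : (j - 1) / 2 = pos
            · rw [hq, pv_getD_set_self _ _ hpos]
              exact hB j hj hj0 hq
            · rw [pv_getD_set_ne _ _ _ _ _ hq]
              exact hA j hj hj0 hjpos
        · intro y
          rw [pv_mem_set_iff _ _ hpos]
    · simp only [if_neg h0]
      have hpos0 : pos = 0 := by omega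
      subst hpos0
      constructor
      · intro j hj hj0
        rw [List.length_set] at hj
        rw [pv_getD_set_ne h 0 item pvD0 j (by omega)]
        by_cases hq : (j - 1) / 2 = 0
        · rw [hq, pv_getD_set_self _ _ hpos]
          exact hB j hj hj0 hq
        · rw [pv_getD_set_ne h 0 item pvD0 _ hq]
          exact hA j hj hj0 (by omega)
      · intro y
        rw [pv_mem_set_iff _ _ hpos]

theorem pvSiftup_spec (fuel : Nat) : ∀ (h : List (Int × Int)) (pos : Nat) (item : Int × Int),
    h.length - pos ≤ fuel → pos < h.length →
    (∀ j, j < h.length → 0 < j → (j - 1) / 2 ≠ pos →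
      pvLe (h.getD ((j - 1) / 2) pvD0) (h.getD j pvD0)) →
    (0 < pos → ∀ j, j < h.length → 0 < j → (j - 1) / 2 = pos →
      pvLe (h.getD ((pos - 1) / 2) pvD0) (h.getD j pvD0)) →
    pvHeapAt (pvSiftup h pos item) ∧
    (∀ y, y ∈ pvSiftup h pos item ↔
      y = item ∨ ∃ i, i < h.length ∧ i ≠ pos ∧ h.getD i pvD0 = y) := by
  induction fuel with
  | zero => intro h pos item hf hpos _ _; omega
  | succ n ih =>
    intro h pos item hf hpos ha hc
    rw [pvSiftup]
    by_cases hch : 2 * pos + 1 < h.length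
    · simp only [dif_pos hch]
      -- the chosen child c (Python: childpos after the right-child test)
      have key : ∀ c : Nat, c = 2 * pos + 1 ∨ c = 2 * pos + 2 → c < h.length →
          pvLe (h.getD c pvD0) (h.getD (2 * pos + 1) pvD0) →
          (2 * pos + 2 < h.length → pvLe (h.getD c pvD0) (h.getD (2 * pos + 2) pvD0)) →
          pvHeapAt (pvSiftup (h.set pos (h.getD c pvD0)) c item) ∧
          (∀ y, y ∈ pvSiftup (h.set pos (h.getD c pvD0)) c item ↔
            y = item ∨ ∃ i, i < h.length ∧ i ≠ pos ∧ h.getD i pvD0 = y) := by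
        intro c hc12 hclen hcl hcr
        have hcpos : pos < c := by omega
        have hcpar : (c - 1) / 2 = pos := by omega
        have hres := ih (h.set pos (h.getD c pvD0)) c item (by simp; omega) (by simp; omega)
          (by -- ha'
            intro j hj hj0 hjc
            rw [List.length_set] at hj
            by_cases hjpos : j = pos
            · rw [hjpos, pv_getD_set_self _ _ (hjpos ▸ hj),
                pv_getD_set_ne _ _ _ _ _ (show (pos - 1) / 2 ≠ pos by omega)]
              exact hc (by omega) c hclen (by omega) hcpar
            · rw [pv_getD_set_ne _ _ _ _ _ hjpos]
              by_cases hq : (j - 1) / 2 = pos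
              · rw [hq, pv_getD_set_self _ _ hpos]
                have : j = 2 * pos + 1 ∨ j = 2 * pos + 2 := by omega
                rcases this with rfl | rfl
                · exact hcl
                · exact hcr hj
              · rw [pv_getD_set_ne _ _ _ _ _ hq]
                exact ha j hj hj0 hq)
          (by -- hc'
            intro _ j hj hj0 hjc
            rw [List.length_set] at hj
            have hjpos : j ≠ pos := by omega
            rw [hcpar, pv_getD_set_self _ _ hpos, pv_getD_set_ne _ _ _ _ _ hjpos]
            have haj := ha j hj hj0 (by omega)
            rw [hjc] at haj
            exact haj)
        refine ⟨hres.1, ?_⟩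
        intro y
        rw [hres.2 y]
        constructor
        · rintro (rfl | ⟨i, hi, hic, hieq⟩)
          · left; rfl
          · rw [List.length_set] at hi
            by_cases hipos : i = pos
            · rw [hipos, pv_getD_set_self _ _ hpos] at hieq
              exact Or.inr ⟨c, hclen, by omega, hieq⟩
            · rw [pv_getD_set_ne _ _ _ _ _ hipos] at hieq
              exact Or.inr ⟨i, hi, hipos, hieq⟩
        · rintro (rfl | ⟨i, hi, hipos, hieq⟩)
          · left; rfl
          · by_cases hic : i = c
            · refine Or.inr ⟨pos, by simp; omega, by omega, ?_⟩
              rw [pv_getD_set_self _ _ hpos, ← hic, hieq]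
            · refine Or.inr ⟨i, by simp; omega, hic, ?_⟩
              rw [pv_getD_set_ne _ _ _ _ _ hipos, hieq]
      by_cases hcond : (2 * pos + 1 + 1 < h.length &&
          !pvLt (h.getD (2 * pos + 1) pvD0) (h.getD (2 * pos + 1 + 1) pvD0)) = true
      · rw [if_pos hcond]
        simp only [Bool.and_eq_true, Bool.not_eq_true', decide_eq_true_eq] at hcond
        exact key (2 * pos + 1 + 1) (by omega) (by omega) (pvLe_of_not_lt hcond.2)
          (fun _ => pvLe_refl _)
      · rw [if_neg hcond]
        simp only [Bool.and_eq_true, Bool.not_eq_true', not_and_or, decide_eq_true_eq, Bool.not_eq_false] at hcond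
        refine key (2 * pos + 1) (by omega) hch (pvLe_refl _) (fun h2 => ?_)
        rcases hcond with h1 | h1
        · omega
        · exact pvLe_of_lt h1
    · simp only [dif_neg hch]
      exact pvSiftdown_spec pos h item hpos
        (fun j hj hj0 hjpos => by
          by_cases hq : (j - 1) / 2 = pos
          · omega
          · exact ha j hj hj0 hq)
        (fun j hj hj0 hq => by omega)
        (fun _ j hj hj0 hq => by omega)

theorem pvHeappush_length (h : List (Int × Int)) (item : Int × Int) :
    (pvHeappush h item).length = h.length + 1 := by
  simp [pvHeappush, pvSiftdown_length]

theorem pvHeappush_spec (h : List (Int × Int)) (item : Int × Int) (hh : pvHeapAt h) :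
    pvHeapAt (pvHeappush h item) ∧
    (∀ y, y ∈ pvHeappush h item ↔ y = item ∨ y ∈ h) := by
  have hres := pvSiftdown_spec h.length (h ++ [item]) item (by simp)
    (by
      intro j hj hj0 hjpos
      simp only [List.length_append, List.length_cons, List.length_nil] at hj
      have hjlen : j < h.length := by omega
      rw [pv_getD_append_left _ _ _ hjlen, pv_getD_append_left _ _ _ (by omega)]
      exact hh j hjlen hj0)
    (by intro j hj hj0 hq; simp at hj; omega)
    (by intro _ j hj hj0 hq; simp at hj; omega)
  refine ⟨hres.1, ?_⟩
  intro y
  rw [pvHeappush, hres.2 y]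
  constructor
  · rintro (rfl | ⟨i, hi, hipos, hieq⟩)
    · left; rfl
    · simp only [List.length_append, List.length_cons, List.length_nil] at hi
      have hilen : i < h.length := by omega
      rw [pv_getD_append_left _ _ _ hilen] at hieq
      exact Or.inr (hieq ▸ pv_getD_mem h i hilen)
  · rintro (rfl | hy)
    · left; rfl
    · obtain ⟨i, hi, hieq⟩ := (pv_mem_iff_getD h y).1 hy
      exact Or.inr ⟨i, by simp; omega, by omega, by rw [pv_getD_append_left _ _ _ hi, hieq]⟩

theorem pvHeappop_spec (h : List (Int × Int)) (hne : h ≠ []) (hh : pvHeapAt h) :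
    (pvHeappop h).1 = h.getD 0 pvD0 ∧ pvHeapAt (pvHeappop h).2 ∧
    (∀ y ∈ (pvHeappop h).2, y ∈ h) ∧
    (∀ y ∈ h, y ≠ h.getD 0 pvD0 → y ∈ (pvHeappop h).2) := by
  have hlen0 : 0 < h.length := List.length_pos_of_ne_nil hne
  have hdl := h.length_dropLast
  cases hd : h.dropLast with
  | nil =>
    have hlen1 : h.length = 1 := by
      have := congrArg List.length hd
      simp at this
      omega
    have hrew : pvHeappop h = (h.getD (h.length - 1) pvD0, []) := by
      unfold pvHeappop
      dsimp only []
      split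
      · rfl
      · rename_i heq; rw [hd] at heq; exact absurd heq.symm (List.cons_ne_nil _ _)
    rw [hrew]
    refine ⟨by rw [List.getD_eq_getElem _ _ (by omega), List.getD_eq_getElem _ _ (by omega)]; simp [hlen1], ?_, ?_, ?_⟩
    · intro j hj hj0; simp at hj
    · intro y hy; simp at hy
    · intro y hy hyne
      obtain ⟨i, hi, hieq⟩ := (pv_mem_iff_getD h y).1 hy
      have hi0 : i = 0 := by omega
      rw [hi0] at hieq
      exact absurd hieq.symm hyne
  | cons r0 t =>
    have hlen2 : 2 ≤ h.length := by
      have := congrArg List.length hd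
      simp at this
      omega
    have hrew : pvHeappop h = (r0, pvSiftup ((r0 :: t).set 0 (h.getD (h.length - 1) pvD0)) 0
        (h.getD (h.length - 1) pvD0)) := by
      unfold pvHeappop
      dsimp only []
      split
      · rename_i heq; rw [hd] at heq; exact absurd heq (List.cons_ne_nil _ _)
      · rename_i r1 t1 heq
        rw [hd] at heq
        injection heq with e1 e2
        subst e1; subst e2
        rw [hd]
    rw [← hd] at hrew
    have hr0 : r0 = h.getD 0 pvD0 := by
      have : h.dropLast.getD 0 pvD0 = r0 := by rw [hd]; rfl
      rw [← this, pv_getD_dropLast _ _ (by omega)]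
    have hLlen : (h.dropLast.set 0 (h.getD (h.length - 1) pvD0)).length = h.length - 1 := by
      simp [hdl]
    have hLget : ∀ i, 0 < i → i < h.length - 1 →
        (h.dropLast.set 0 (h.getD (h.length - 1) pvD0)).getD i pvD0 = h.getD i pvD0 := by
      intro i hi0 hi
      rw [pv_getD_set_ne _ _ _ _ _ (by omega), pv_getD_dropLast _ _ hi]
    have hres := pvSiftup_spec (h.length - 1) (h.dropLast.set 0 (h.getD (h.length - 1) pvD0)) 0
      (h.getD (h.length - 1) pvD0) (by omega) (by omega)
      (by
        intro j hj hj0 hq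
        rw [hLlen] at hj
        rw [hLget j hj0 hj, hLget _ (by omega) (by omega)]
        exact hh j (by omega) hj0)
      (by omega)
    rw [hrew]
    refine ⟨hr0, hres.1, ?_, ?_⟩
    · intro y hy
      rw [hres.2 y] at hy
      rcases hy with rfl | ⟨i, hi, hi0, hieq⟩
      · exact pv_getD_mem h _ (by omega)
      · rw [hLlen] at hi
        rw [hLget i (by omega) hi] at hieq
        exact hieq ▸ pv_getD_mem h i (by omega)
    · intro y hy hyne
      rw [hres.2 y]
      obtain ⟨i, hi, hieq⟩ := (pv_mem_iff_getD h y).1 hy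
      have hi0 : i ≠ 0 := by
        intro h0
        rw [h0] at hieq
        exact hyne hieq.symm
      by_cases hil : i = h.length - 1
      · left; rw [← hieq, hil]
      · right
        exact ⟨i, by rw [hLlen]; omega, hi0, by rw [hLget i (by omega) (by omega)]; exact hieq⟩

theorem pvPrune_spec (left : Int) (fuel : Nat) : ∀ (h : List (Int × Int)),
    h.length ≤ fuel → pvHeapAt h →
    pvHeapAt (pvPrune h left) ∧
    (∀ y ∈ pvPrune h left, y ∈ h) ∧
    (∀ y ∈ h, left ≤ y.2 → y ∈ pvPrune h left) ∧
    (pvPrune h left ≠ [] → left ≤ ((pvPrune h left).getD 0 pvD0).2) := by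
  induction fuel with
  | zero =>
    intro h hf _
    have hnil : h = [] := by cases h <;> simp_all
    subst hnil
    rw [pvPrune]
    exact ⟨by intro j hj _; simp at hj, by intro y hy; simp at hy,
      by intro y hy; simp at hy, by intro hc; simp at hc⟩
  | succ n ih =>
    intro h hf hh
    cases h with
    | nil =>
      rw [pvPrune]
      exact ⟨by intro j hj _; simp at hj, by intro y hy; simp at hy,
        by intro y hy; simp at hy, by intro hc; simp at hc⟩
    | cons h0 tl =>
      have hne : h0 :: tl ≠ [] := List.cons_ne_nil _ _
      have hget0 : (h0 :: tl).getD 0 pvD0 = h0 := rfl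
      have hrw : pvPrune (h0 :: tl) left =
          if h0.2 < left then pvPrune (pvHeappop (h0 :: tl)).2 left else h0 :: tl := by
        rw [pvPrune]
      rw [hrw]
      by_cases hpop : h0.2 < left
      · rw [if_pos hpop]
        have hpl := pvHeappop_length _ hne
        have hps := pvHeappop_spec _ hne hh
        have hrec := ih (pvHeappop (h0 :: tl)).2
          (by rw [hpl]; simp at hf ⊢; omega) hps.2.1
        refine ⟨hrec.1, ?_, ?_, hrec.2.2.2⟩
        · intro y hy
          exact hps.2.2.1 y (hrec.2.1 y hy)
        · intro y hy hyl
          refine hrec.2.2.1 y ?_ hyl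
          refine hps.2.2.2 y hy ?_
          intro heq
          rw [heq, hget0] at hyl
          omega
      · rw [if_neg hpop]
        exact ⟨hh, fun y hy => hy, fun y hy _ => hy, fun _ => by rw [hget0]; omega⟩
-- ---- heap contents during A's loop: genuine (value, index) entries ----
def pvEntry (xs : List Int) (s : Int) (j : Nat) : Int × Int := (s * xs.getD j 0, (j : Int))

def pvGood (xs : List Int) (s : Int) (l r : Nat) (h : List (Int × Int)) : Prop :=
  pvHeapAt h ∧ (∀ p ∈ h, ∃ j : Nat, j < r ∧ p = pvEntry xs s j) ∧
  (∀ j : Nat, l ≤ j → j < r → pvEntry xs s j ∈ h)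

-- window [i, i+w) of the scores, and its power max-min (as B computes it)
def pvWin (xs : List Int) (w : Int) (i : Nat) : List Int := (xs.drop i).take w.toNat

def pvPow (xs : List Int) (w : Int) (i : Nat) : Int :=
  (PySem.List.max? (pvWin xs w i) (fun x => x)).getD 0
    - (PySem.List.min? (pvWin xs w i) (fun x => x)).getD 0

-- running minimum with float('inf') as none, exactly A's update step
def pvAccMin (mp : Option Int) (ps : List Int) : Option Int :=
  ps.foldl (fun b p => some (match b with | none => p | some m => min m p)) mp

theorem pvGood_push (xs : List Int) (s : Int) (l r : Nat) (h : List (Int × Int))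
    (hg : pvGood xs s l r h) :
    pvGood xs s l (r + 1) (pvHeappush h (pvEntry xs s r)) := by
  obtain ⟨hh, hsub, hwin⟩ := hg
  have hp := pvHeappush_spec h (pvEntry xs s r) hh
  refine ⟨hp.1, ?_, ?_⟩
  · intro p hpmem
    rcases (hp.2 p).1 hpmem with rfl | hmem
    · exact ⟨r, by omega, rfl⟩
    · obtain ⟨j, hj, rfl⟩ := hsub _ hmem
      exact ⟨j, by omega, rfl⟩
  · intro j hjl hjr
    by_cases hjr' : j = r
    · subst hjr'
      exact (hp.2 _).2 (Or.inl rfl)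
    · exact (hp.2 _).2 (Or.inr (hwin j hjl (by omega)))

theorem pvGood_mono (xs : List Int) (s : Int) (l l' r : Nat) (h : List (Int × Int))
    (hll : l ≤ l') (hg : pvGood xs s l r h) : pvGood xs s l' r h :=
  ⟨hg.1, hg.2.1, fun j hjl hjr => hg.2.2 j (by omega) hjr⟩

theorem pvGood_prune (xs : List Int) (s : Int) (l r : Nat) (h : List (Int × Int))
    (hg : pvGood xs s l r h) :
    pvGood xs s l r (pvPrune h (l : Int)) ∧
    (pvPrune h (l : Int) ≠ [] → (l : Int) ≤ ((pvPrune h (l : Int)).getD 0 pvD0).2) := by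
  obtain ⟨hh, hsub, hwin⟩ := hg
  have hp := pvPrune_spec (l : Int) h.length h (le_refl _) hh
  refine ⟨⟨hp.1, ?_, ?_⟩, hp.2.2.2⟩
  · intro p hpmem
    exact hsub p (hp.2.1 p hpmem)
  · intro j hjl hjr
    refine hp.2.2.1 _ (hwin j hjl hjr) ?_
    show (l : Int) ≤ ((j : Int))
    exact_mod_cast hjl

theorem pvGood_length (xs : List Int) (s : Int) (l r : Nat) (h : List (Int × Int))
    (hg : pvGood xs s l r h) (hlr : l ≤ r) : r - l ≤ h.length := by
  have hsub : (List.range' l (r - l)).map (pvEntry xs s) ⊆ h := by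
    intro p hp
    obtain ⟨j, hj, rfl⟩ := List.mem_map.1 hp
    rw [List.mem_range'_1] at hj
    exact hg.2.2 j hj.1 (by omega)
  have hnd : ((List.range' l (r - l)).map (pvEntry xs s)).Nodup := by
    refine List.Nodup.map ?_ (List.nodup_range')
    intro a b hab
    have := congrArg Prod.snd hab
    simpa [pvEntry] using this
  have := (List.subperm_of_subset hnd hsub).length_le
  simpa using this

theorem pvRoot_char (xs : List Int) (s : Int) (l r : Nat) (h : List (Int × Int))
    (hg : pvGood xs s l r h) (hne : h ≠ [])
    (hroot : (l : Int) ≤ (h.getD 0 pvD0).2) :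
    ∃ j0 : Nat, l ≤ j0 ∧ j0 < r ∧ (h.getD 0 pvD0).1 = s * xs.getD j0 0 ∧
      (∀ j : Nat, l ≤ j → j < r → s * xs.getD j0 0 ≤ s * xs.getD j 0) := by
  obtain ⟨hh, hsub, hwin⟩ := hg
  have hrm : h.getD 0 pvD0 ∈ h := pv_getD_mem h 0 (List.length_pos_of_ne_nil hne)
  obtain ⟨j0, hj0r, hj0eq⟩ := hsub _ hrm
  have hj0l : l ≤ j0 := by
    rw [hj0eq] at hroot
    simp only [pvEntry] at hroot
    exact_mod_cast hroot
  refine ⟨j0, hj0l, hj0r, by rw [hj0eq]; rfl, ?_⟩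
  intro j hjl hjr
  have hle := pvHeapAt_root_min h hh _ (hwin j hjl hjr)
  rw [hj0eq] at hle
  have := pvLe_fst hle
  simpa [pvEntry] using this

theorem pvWin_length (xs : List Int) (w : Int) (i : Nat) (hiw : i + w.toNat ≤ xs.length) :
    (pvWin xs w i).length = w.toNat := by
  simp [pvWin]
  omega

theorem pvWin_mem (xs : List Int) (w : Int) (i : Nat) (hiw : i + w.toNat ≤ xs.length)
    (y : Int) : y ∈ pvWin xs w i ↔ ∃ j : Nat, i ≤ j ∧ j < i + w.toNat ∧ y = xs.getD j 0 := by
  rw [List.mem_iff_getElem]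
  constructor
  · rintro ⟨t, ht, rfl⟩
    rw [pvWin_length _ _ _ hiw] at ht
    refine ⟨i + t, by omega, by omega, ?_⟩
    rw [List.getD_eq_getElem _ _ (by omega)]
    simp [pvWin, List.getElem_take, List.getElem_drop]
  · rintro ⟨j, hji, hjw, rfl⟩
    refine ⟨j - i, by rw [pvWin_length _ _ _ hiw]; omega, ?_⟩
    rw [List.getD_eq_getElem _ _ (by omega)]
    simp [pvWin, List.getElem_take, List.getElem_drop]
    congr 1
    omega

theorem pvPow_eq (xs : List Int) (w : Int) (l : Nat) (hw : 1 ≤ w)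
    (hlw : l + w.toNat ≤ xs.length)
    (vmin vmax : Int)
    (hminw : ∃ j : Nat, l ≤ j ∧ j < l + w.toNat ∧ vmin = xs.getD j 0)
    (hmaxw : ∃ j : Nat, l ≤ j ∧ j < l + w.toNat ∧ vmax = xs.getD j 0)
    (hminle : ∀ j : Nat, l ≤ j → j < l + w.toNat → vmin ≤ xs.getD j 0)
    (hmaxge : ∀ j : Nat, l ≤ j → j < l + w.toNat → xs.getD j 0 ≤ vmax) :
    pvPow xs w l = vmax - vmin := by
  have hne : pvWin xs w l ≠ [] := by
    intro hcon
    have := pvWin_length xs w l hlw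
    rw [hcon] at this
    simp at this
    omega
  have hmax : (PySem.List.max? (pvWin xs w l) (fun x => x)).getD 0 = vmax := by
    cases hq : PySem.List.max? (pvWin xs w l) (fun x => x) with
    | none => exact absurd ((PySem.List.max?_eq_none_iff _ _).1 hq) hne
    | some m =>
      obtain ⟨j, hj1, hj2, rfl⟩ := (pvWin_mem xs w l hlw m).1 (PySem.List.max?_mem hq)
      have h1 : xs.getD j 0 ≤ vmax := hmaxge j hj1 hj2
      obtain ⟨j', hj'1, hj'2, hveq⟩ := hmaxw
      have h2 : vmax ≤ xs.getD j 0 := by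
        have := PySem.List.max?_isMax hq vmax ((pvWin_mem xs w l hlw vmax).2 ⟨j', hj'1, hj'2, hveq⟩)
        simpa using this
      simpa using le_antisymm h1 h2
  have hmin : (PySem.List.min? (pvWin xs w l) (fun x => x)).getD 0 = vmin := by
    cases hq : PySem.List.min? (pvWin xs w l) (fun x => x) with
    | none => exact absurd ((PySem.List.min?_eq_none_iff _ _).1 hq) hne
    | some m =>
      obtain ⟨j, hj1, hj2, rfl⟩ := (pvWin_mem xs w l hlw m).1 (PySem.List.min?_mem hq)
      have h1 : vmin ≤ xs.getD j 0 := hminle j hj1 hj2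
      obtain ⟨j', hj'1, hj'2, hveq⟩ := hminw
      have h2 : xs.getD j 0 ≤ vmin := by
        have := PySem.List.min?_isMin hq vmin ((pvWin_mem xs w l hlw vmin).2 ⟨j', hj'1, hj'2, hveq⟩)
        simpa using this
      simpa using le_antisymm h2 h1
  rw [pvPow, hmax, hmin]

theorem pvLoopA_phase2 (xs : List Int) (k : Int) (fuel : Nat) :
    ∀ (r l : Nat) (mh xh : List (Int × Int)) (mp : Option Int),
    xs.length - r ≤ fuel → r ≤ xs.length →
    (l : Int) + (if 1 < k then k else 1) = (r : Int) + 1 →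
    pvGood xs 1 l r mh → pvGood xs (-1) l r xh →
    pvLoopA xs k mh xh (l : Int) (r : Int) mp
      = pvAccMin mp ((List.range' l (xs.length - r)).map (pvPow xs (if 1 < k then k else 1))) := by
  have hw1 : (1 : Int) ≤ (if 1 < k then k else 1) := by split <;> omega
  induction fuel with
  | zero =>
    intro r l mh xh mp hf hr hl hm hx
    rw [pvLoopA, dif_neg (by omega : ¬ ((r : Int) < (xs.length : Int)))]
    rw [show xs.length - r = 0 by omega]
    simp [pvAccMin]
  | succ n ih =>
    intro r l mh xh mp hf hr hl hm hx
    by_cases hrn : r < xs.length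
    · have hlr : l ≤ r := by omega
      rw [pvLoopA, dif_pos (by omega : (r : Int) < (xs.length : Int))]
      dsimp only []
      have hlen : ¬ ((mh.length : Int) < k - 1) := by
        have hg := pvGood_length xs 1 l r mh hm hlr
        by_cases hk : 1 < k
        · rw [if_pos hk] at hl; omega
        · omega
      rw [if_neg hlen]
      have he1 : (PySem.List.pyGetD xs (r : Int) 0, (r : Int)) = pvEntry xs 1 r := by
        simp [pvEntry, PySem.List.pyGetD_natCast]
      have he2 : (-1 * PySem.List.pyGetD xs (r : Int) 0, (r : Int)) = pvEntry xs (-1) r := by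
        simp [pvEntry, PySem.List.pyGetD_natCast]
      rw [he1, he2]
      have hm1 := pvGood_push xs 1 l r mh hm
      have hx1 := pvGood_push xs (-1) l r xh hx
      have hm2 := pvGood_prune xs 1 l (r + 1) _ hm1
      have hx2 := pvGood_prune xs (-1) l (r + 1) _ hx1
      have hmem_m : pvEntry xs 1 r ∈ pvPrune (pvHeappush mh (pvEntry xs 1 r)) (l : Int) :=
        hm2.1.2.2 r hlr (by omega)
      have hmem_x : pvEntry xs (-1) r ∈ pvPrune (pvHeappush xh (pvEntry xs (-1) r)) (l : Int) :=
        hx2.1.2.2 r hlr (by omega)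
      have hne_m := List.ne_nil_of_mem hmem_m
      have hne_x := List.ne_nil_of_mem hmem_x
      rw [if_pos ⟨hne_x, hne_m⟩]
      have hwn : l + (if 1 < k then k else 1).toNat = r + 1 := by
        by_cases hk : 1 < k
        · rw [if_pos hk] at hl ⊢; omega
        · rw [if_neg hk] at hl ⊢; omega
      obtain ⟨jm, hjm1, hjm2, hjmv, hjmin⟩ :=
        pvRoot_char xs 1 l (r + 1) _ hm2.1 hne_m (hm2.2 hne_m)
      obtain ⟨jx, hjx1, hjx2, hjxv, hjmax⟩ :=
        pvRoot_char xs (-1) l (r + 1) _ hx2.1 hne_x (hx2.2 hne_x)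
      have hpow : -1 * ((pvPrune (pvHeappush xh (pvEntry xs (-1) r)) (l : Int)).getD 0 pvD0).1
          - ((pvPrune (pvHeappush mh (pvEntry xs 1 r)) (l : Int)).getD 0 pvD0).1
          = pvPow xs (if 1 < k then k else 1) l := by
        rw [hjxv, hjmv]
        rw [pvPow_eq xs (if 1 < k then k else 1) l hw1 (by omega)
          (xs.getD jm 0) (xs.getD jx 0)
          ⟨jm, hjm1, by omega, rfl⟩ ⟨jx, hjx1, by omega, rfl⟩
          (by intro j hj1 hj2; have := hjmin j hj1 (by omega); omega)
          (by intro j hj1 hj2; have := hjmax j hj1 (by omega); omega)]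
        ring
      rw [hpow]
      rw [show ((l : Int) + 1) = ((l + 1 : Nat) : Int) by push_cast; ring,
        show ((r : Int) + 1) = ((r + 1 : Nat) : Int) by push_cast; ring]
      rw [ih (r + 1) (l + 1) _ _ _ (by omega) (by omega) (by push_cast; omega)
        (pvGood_mono xs 1 l (l + 1) (r + 1) _ (by omega) hm2.1)
        (pvGood_mono xs (-1) l (l + 1) (r + 1) _ (by omega) hx2.1)]
      rw [show xs.length - r = (xs.length - (r + 1)) + 1 by omega, List.range'_succ]
      simp [pvAccMin]
    · rw [pvLoopA, dif_neg (by omega : ¬ ((r : Int) < (xs.length : Int)))]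
      rw [show xs.length - r = 0 by omega]
      simp [pvAccMin]

theorem pvLoopA_phase1 (xs : List Int) (k : Int) (hk : 1 < k) (fuel : Nat) :
    ∀ (r : Nat) (mh xh : List (Int × Int)),
    xs.length - r ≤ fuel → r ≤ xs.length → (r : Int) ≤ k - 1 →
    pvGood xs 1 0 r mh → mh.length = r → pvGood xs (-1) 0 r xh → xh.length = r →
    pvLoopA xs k mh xh 0 (r : Int) none
      = pvAccMin none ((List.range' 0 (xs.length + 1 - k.toNat)).map
          (pvPow xs (if 1 < k then k else 1))) := by
  induction fuel with
  | zero =>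
    intro r mh xh hf hr hrk hm hml hx hxl
    rw [pvLoopA, dif_neg (by omega : ¬ ((r : Int) < (xs.length : Int)))]
    rw [show xs.length + 1 - k.toNat = 0 by omega]
    simp [pvAccMin]
  | succ n ih =>
    intro r mh xh hf hr hrk hm hml hx hxl
    by_cases hreq : (r : Int) = k - 1
    · have h2 := pvLoopA_phase2 xs k xs.length r 0 mh xh none (by omega) hr
        (by rw [if_pos hk]; omega) hm hx
      rw [show ((0 : Nat) : Int) = (0 : Int) by simp] at h2
      rw [h2, show xs.length - r = xs.length + 1 - k.toNat by omega]
    · by_cases hrn : r < xs.length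
      · rw [pvLoopA, dif_pos (by omega : (r : Int) < (xs.length : Int))]
        dsimp only []
        rw [if_pos (by omega : (mh.length : Int) < k - 1)]
        rw [show (PySem.List.pyGetD xs (r : Int) 0, (r : Int)) = pvEntry xs 1 r by
            simp [pvEntry, PySem.List.pyGetD_natCast],
          show (-1 * PySem.List.pyGetD xs (r : Int) 0, (r : Int)) = pvEntry xs (-1) r by
            simp [pvEntry, PySem.List.pyGetD_natCast]]
        rw [show ((r : Int) + 1) = ((r + 1 : Nat) : Int) by push_cast; ring]
        exact ih (r + 1) _ _ (by omega) (by omega) (by push_cast; omega)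
          (pvGood_push xs 1 0 r mh hm) (by rw [pvHeappush_length, hml])
          (pvGood_push xs (-1) 0 r xh hx) (by rw [pvHeappush_length, hxl])
      · rw [pvLoopA, dif_neg (by omega : ¬ ((r : Int) < (xs.length : Int)))]
        rw [show xs.length + 1 - k.toNat = 0 by omega]
        simp [pvAccMin]

theorem pv_step_eq (P : Int) (b : Option Int) :
    (match b with
     | none => some P
     | some m => if P < m then some P else some m)
    = some (match b with | none => P | some m => min m P) := by
  rcases b with _ | m
  · rfl
  · show (if P < m then some P else some m) = some (min m P)
    rcases lt_or_ge P m with h | h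
    · rw [if_pos h, min_eq_right h.le]
    · rw [if_neg (not_lt.2 h), min_eq_left h]

theorem pvSlice_win (xs : List Int) (w : Int) (hw : 0 ≤ w) (t : Nat) :
    PySem.List.slice xs (some ((0 : Int) + (t : Nat))) (some ((0 : Int) + (t : Nat) + w))
      = pvWin xs w t := by
  rw [show ((0 : Int) + (t : Nat)) = ((t : Nat) : Int) by ring]
  rw [PySem.List.slice_toNat _ (by omega) (by omega)]
  rw [show (((t : Nat) : Int) + w).toNat - (((t : Nat) : Int)).toNat = w.toNat by omega]
  rw [show (((t : Nat) : Int)).toNat = t by omega]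
  rfl

theorem pvFoldAlt (xs : List Int) (w : Int) (hw : 0 ≤ w) (l : List Nat) :
    ∀ b : Option Int,
    l.foldl (fun best t =>
      match best with
      | none => some ((PySem.List.max? (PySem.List.slice xs (some ((0 : Int) + t))
            (some ((0 : Int) + t + w))) (fun x => x)).getD 0
          - (PySem.List.min? (PySem.List.slice xs (some ((0 : Int) + t))
            (some ((0 : Int) + t + w))) (fun x => x)).getD 0)
      | some bb =>
          if ((PySem.List.max? (PySem.List.slice xs (some ((0 : Int) + t))
            (some ((0 : Int) + t + w))) (fun x => x)).getD 0
          - (PySem.List.min? (PySem.List.slice xs (some ((0 : Int) + t))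
            (some ((0 : Int) + t + w))) (fun x => x)).getD 0) < bb
          then some ((PySem.List.max? (PySem.List.slice xs (some ((0 : Int) + t))
            (some ((0 : Int) + t + w))) (fun x => x)).getD 0
          - (PySem.List.min? (PySem.List.slice xs (some ((0 : Int) + t))
            (some ((0 : Int) + t + w))) (fun x => x)).getD 0)
          else some bb) b
    = pvAccMin b (l.map (pvPow xs w)) := by
  induction l with
  | nil => intro b; rfl
  | cons t ts ih =>
    intro b
    rw [List.foldl_cons, ih, List.map_cons]
    show pvAccMin _ _ = List.foldl _ _ (pvPow xs w t :: List.map (pvPow xs w) ts)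
    rw [List.foldl_cons]
    show pvAccMin _ _ = pvAccMin _ _
    rw [pvSlice_win xs w hw t, pv_step_eq]
    rfl

theorem pvAlt_eq (xs : List Int) (k : Int) :
    get_min_power_alt xs k =
      (match pvAccMin none ((List.range' 0 (xs.length + 1 - (if 1 < k then k else 1).toNat)).map
          (pvPow xs (if 1 < k then k else 1))) with
       | none => -1
       | some b => b) := by
  have hw1 : (1 : Int) ≤ (if 1 < k then k else 1) := by split <;> omega
  unfold get_min_power_alt
  dsimp only []
  by_cases hwn : (if 1 < k then k else 1) > (xs.length : Int)
  · rw [if_pos hwn, show xs.length + 1 - (if 1 < k then k else 1).toNat = 0 by omega]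
    rfl
  · rw [if_neg hwn]
    rw [PySem.List.pyRange_one, List.foldl_map]
    rw [pvFoldAlt xs _ (by omega)]
    rw [List.range_eq_range']
    rw [show ((xs.length : Int) - (if 1 < k then k else 1) + 1 - 0).toNat
        = xs.length + 1 - (if 1 < k then k else 1).toNat by omega]

theorem pvMain (xs : List Int) (k : Int) :
    get_min_power xs k = get_min_power_alt xs k := by
  have hgood : ∀ s : Int, pvGood xs s 0 0 [] := by
    intro s
    exact ⟨by intro j hj _; simp at hj, by intro p hp; simp at hp,
      by intro j hj1 hj2; omega⟩
  rw [pvAlt_eq]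
  unfold get_min_power
  by_cases hk : 1 < k
  · have h1 := pvLoopA_phase1 xs k hk xs.length 0 [] [] (by omega) (by omega)
      (by omega) (hgood 1) rfl (hgood (-1)) rfl
    rw [Nat.cast_zero] at h1
    rw [h1, show (if 1 < k then k else 1) = k from if_pos hk]
    cases hq : pvAccMin none (List.map (pvPow xs k) (List.range' 0 (xs.length + 1 - k.toNat))) <;> rfl
  · have h2 := pvLoopA_phase2 xs k xs.length 0 0 [] [] none (by omega) (by omega)
      (by rw [if_neg hk]) (hgood 1) (hgood (-1))
    rw [Nat.cast_zero] at h2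
    rw [h2, show xs.length - 0 = xs.length + 1 - (if 1 < k then k else 1).toNat by
      rw [if_neg hk]; omega]
    cases hq : pvAccMin none (List.map (pvPow xs (if 1 < k then k else 1))
      (List.range' 0 (xs.length + 1 - (if 1 < k then k else 1).toNat))) <;> rfl

-- ===== VERDICT (by name: the statement is the Claim_ definition above) =====
theorem get_min_power_spec : Claim_equal_get_min_power := by
  intro peopleScores k _
  unfold Spec_get_min_power
  exact pvMain peopleScores k
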